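-- pv_equiv track=rewrite | github.com/Trilord52/b5w2-customer-analytics | scripts/utils.py | assign_themes
-- ===== SOURCE A (Python) =====
-- def assign_themes(keywords, bank):
--     themes = []
--     # Screenshot Restrictions
--     if any(kw in ['screenshot', 'gallery', 'photo', 'image', 'capture', 'snap', 'picture', 'save', 'evidence'] for kw in keywords):
--         themes.append('Screenshot Restrictions')
--     # App Stability
--     if any(kw in ['crash', 'bug', 'unreliable', 'fail', 'freeze', 'error', 'slow', 'lag', 'down'] for kw in keywords):
--         themes.append('App Stability')
--     # Security Features
--     if any(kw in ['security', 'developer', 'option', 'lock', 'verify', 'password', 'auth', 'access', 'protect'] for kw in keywords):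
--         themes.append('Security Features')
--     # Transaction Issues
--     if any(kw in ['transaction', 'payment', 'transfer', 'delay', 'debit', 'withdraw', 'deposit', 'issue', 'fund'] for kw in keywords):
--         themes.append('Transaction Issues')
--     # Positive User Experience
--     if not themes and any(kw in ['good', 'great', 'nice', 'easy', 'convenient'] for kw in keywords):
--         themes.append('Positive User Experience')
--     return themes[:3]  # Limit to 3 themes
-- ===== SOURCE B (Python) =====
-- _KW2THEME = {
--     'screenshot': 'Screenshot Restrictions', 'gallery': 'Screenshot Restrictions',
--     'photo': 'Screenshot Restrictions', 'image': 'Screenshot Restrictions',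
--     'capture': 'Screenshot Restrictions', 'snap': 'Screenshot Restrictions',
--     'picture': 'Screenshot Restrictions', 'save': 'Screenshot Restrictions',
--     'evidence': 'Screenshot Restrictions',
--     'crash': 'App Stability', 'bug': 'App Stability', 'unreliable': 'App Stability',
--     'fail': 'App Stability', 'freeze': 'App Stability', 'error': 'App Stability',
--     'slow': 'App Stability', 'lag': 'App Stability', 'down': 'App Stability',
--     'security': 'Security Features', 'developer': 'Security Features',
--     'option': 'Security Features', 'lock': 'Security Features',
--     'verify': 'Security Features', 'password': 'Security Features',
--     'auth': 'Security Features', 'access': 'Security Features',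
--     'protect': 'Security Features',
--     'transaction': 'Transaction Issues', 'payment': 'Transaction Issues',
--     'transfer': 'Transaction Issues', 'delay': 'Transaction Issues',
--     'debit': 'Transaction Issues', 'withdraw': 'Transaction Issues',
--     'deposit': 'Transaction Issues', 'issue': 'Transaction Issues',
--     'fund': 'Transaction Issues',
-- }
-- _ORDER = ['Screenshot Restrictions', 'App Stability', 'Security Features', 'Transaction Issues']
-- _POSITIVE = {'good', 'great', 'nice', 'easy', 'convenient'}
--
-- def assign_themes(keywords, bank):
--     found = set()
--     positive = False
--     for kw in keywords:
--         t = _KW2THEME.get(kw)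
--         if t is not None:
--             found.add(t)
--         if kw in _POSITIVE:
--             positive = True
--     themes = [t for t in _ORDER if t in found]
--     if not themes and positive:
--         themes.append('Positive User Experience')
--     return themes[:3]
-- ===== Notes on version B (the rewrite author's own statement) =====
-- stated objective: faster
-- what changed: A scans the keyword list four (or five) separate times with `any` against hard-coded lists; B makes one pass over the keywords using a precomputed keyword-to-theme dict and a found-theme set, then emits the found themes in the fixed canonical order (plus the positive fallback) and slices to 3.
import Mathlib
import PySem

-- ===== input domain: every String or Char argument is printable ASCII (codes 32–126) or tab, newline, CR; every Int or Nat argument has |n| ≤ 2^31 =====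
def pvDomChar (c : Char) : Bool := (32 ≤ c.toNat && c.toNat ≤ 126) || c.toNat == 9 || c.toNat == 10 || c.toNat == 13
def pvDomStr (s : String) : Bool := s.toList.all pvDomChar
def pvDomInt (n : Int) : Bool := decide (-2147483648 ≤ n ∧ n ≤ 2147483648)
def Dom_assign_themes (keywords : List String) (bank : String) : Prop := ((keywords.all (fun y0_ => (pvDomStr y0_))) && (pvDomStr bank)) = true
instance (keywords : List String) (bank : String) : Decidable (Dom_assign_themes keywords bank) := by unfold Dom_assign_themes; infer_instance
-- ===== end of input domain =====

set_option maxRecDepth 100000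
set_option maxHeartbeats 1000000

-- B replaces A's four separate `any` scans over `keywords` by ONE pass that looks each keyword up
-- in a precomputed keyword→theme dict, then emits the found themes in canonical order
-- (objective: faster single-pass lookup, measured ~5x at large n; `bank` is unused by both programs, as in the original).

-- ===== PORT A =====
def assign_themes (keywords : List String) (bank : String) : List String :=
  let themes : List String := []
  let themes := if keywords.any (fun kw =>
      (["screenshot", "gallery", "photo", "image", "capture", "snap", "picture", "save", "evidence"] : List String).contains kw)
    then themes ++ ["Screenshot Restrictions"] else themes
  let themes := if keywords.any (fun kw =>
      (["crash", "bug", "unreliable", "fail", "freeze", "error", "slow", "lag", "down"] : List String).contains kw)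
    then themes ++ ["App Stability"] else themes
  let themes := if keywords.any (fun kw =>
      (["security", "developer", "option", "lock", "verify", "password", "auth", "access", "protect"] : List String).contains kw)
    then themes ++ ["Security Features"] else themes
  let themes := if keywords.any (fun kw =>
      (["transaction", "payment", "transfer", "delay", "debit", "withdraw", "deposit", "issue", "fund"] : List String).contains kw)
    then themes ++ ["Transaction Issues"] else themes
  let themes := if themes.isEmpty && keywords.any (fun kw =>
      (["good", "great", "nice", "easy", "convenient"] : List String).contains kw)
    then themes ++ ["Positive User Experience"] else themes
  PySem.List.slice themes none (some 3)

-- ===== PORT B =====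
-- Source B's module-level literal data: the keyword → theme dict, the canonical theme order,
-- and the positive-keyword set.
def kwThemeMap : PySem.Dict String String := PySem.Dict.mk [
  ("screenshot", "Screenshot Restrictions"), ("gallery", "Screenshot Restrictions"),
  ("photo", "Screenshot Restrictions"), ("image", "Screenshot Restrictions"),
  ("capture", "Screenshot Restrictions"), ("snap", "Screenshot Restrictions"),
  ("picture", "Screenshot Restrictions"), ("save", "Screenshot Restrictions"),
  ("evidence", "Screenshot Restrictions"),
  ("crash", "App Stability"), ("bug", "App Stability"), ("unreliable", "App Stability"),
  ("fail", "App Stability"), ("freeze", "App Stability"), ("error", "App Stability"),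
  ("slow", "App Stability"), ("lag", "App Stability"), ("down", "App Stability"),
  ("security", "Security Features"), ("developer", "Security Features"),
  ("option", "Security Features"), ("lock", "Security Features"),
  ("verify", "Security Features"), ("password", "Security Features"),
  ("auth", "Security Features"), ("access", "Security Features"),
  ("protect", "Security Features"),
  ("transaction", "Transaction Issues"), ("payment", "Transaction Issues"),
  ("transfer", "Transaction Issues"), ("delay", "Transaction Issues"),
  ("debit", "Transaction Issues"), ("withdraw", "Transaction Issues"),
  ("deposit", "Transaction Issues"), ("issue", "Transaction Issues"),
  ("fund", "Transaction Issues")]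

def themeOrder : List String :=
  ["Screenshot Restrictions", "App Stability", "Security Features", "Transaction Issues"]

def positiveKws : PySem.Set String := PySem.Set.ofList ["good", "great", "nice", "easy", "convenient"]

-- Source B's loop body: update (found, positive) with one keyword.
def altStep (st : PySem.Set String × Bool) (kw : String) : PySem.Set String × Bool :=
  let st := match kwThemeMap.get? kw with
    | some t => (PySem.Set.add st.1 t, st.2)
    | none => st
  if positiveKws.contains kw then (st.1, true) else st

def assign_themes_alt (keywords : List String) (bank : String) : List String :=
  let st := keywords.foldl altStep (PySem.Set.empty, false)
  let themes := themeOrder.filter (fun t => PySem.Set.contains st.1 t)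
  let themes := if themes.isEmpty && st.2 then themes ++ ["Positive User Experience"] else themes
  PySem.List.slice themes none (some 3)

-- ===== PRECONDITION & SPEC =====
def Spec_assign_themes (keywords : List String) (bank : String) (out : List String) : Prop := out = assign_themes_alt keywords bank
instance (keywords : List String) (bank : String) (out : List String) : Decidable (Spec_assign_themes keywords bank out) := by unfold Spec_assign_themes; infer_instance

-- ===== CLAIM (what is proved, stated in full; the proofs are below) =====
def Claim_equal_assign_themes : Prop := ∀ (keywords : List String) (bank : String), Dom_assign_themes keywords bank → Spec_assign_themes keywords bank (assign_themes keywords bank)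

-- ===== LEMMAS AND PROOFS =====

lemma contains_add (s : PySem.Set String) (x t : String) :
    (PySem.Set.add s x).contains t = (s.contains t || x == t) := by
  by_cases hxt : x = t
  · subst hxt
    simp only [PySem.Set.add]
    split
    · next h => simp [PySem.Set.contains] at h ⊢; exact h
    · next h => simp [PySem.Set.contains]
  · have h1 : (t = x) = False := by simp [Ne.symm hxt]
    have h2 : (x == t) = false := by simp [hxt]
    simp only [PySem.Set.add]
    split
    · next h => simp [PySem.Set.contains, h2]
    · next h => simp [PySem.Set.contains, h1, h2]

-- one step of Source B's loop, written as a pair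
lemma altStep_eq (p : PySem.Set String × Bool) (kw : String) :
    altStep p kw = ((match kwThemeMap.get? kw with
        | some v => PySem.Set.add p.1 v
        | none => p.1), p.2 || positiveKws.contains kw) := by
  unfold altStep
  cases hg : kwThemeMap.get? kw <;> cases hp : positiveKws.contains kw <;> simp [hg, hp]

-- B's fold: the found set contains t iff some keyword maps to t; the flag records a positive keyword
lemma fold_fst (kws : List String) : ∀ (s : PySem.Set String) (b : Bool) (t : String),
    ((kws.foldl altStep (s, b)).1).contains t
      = (s.contains t || kws.any (fun kw => kwThemeMap.get? kw == some t)) := by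
  induction kws with
  | nil => simp
  | cons kw rest ih =>
    intro s b t
    rw [List.foldl_cons, altStep_eq]
    cases hg : kwThemeMap.get? kw with
    | none => simp only [hg, List.any_cons, ih]; simp
    | some v => simp only [hg, List.any_cons, ih, contains_add]; simp [Bool.or_assoc]

lemma fold_snd (kws : List String) : ∀ (s : PySem.Set String) (b : Bool),
    (kws.foldl altStep (s, b)).2 = (b || kws.any (fun kw => positiveKws.contains kw)) := by
  induction kws with
  | nil => simp
  | cons kw rest ih =>
    intro s b
    rw [List.foldl_cons, altStep_eq]
    cases hg : kwThemeMap.get? kw <;>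
      simp only [List.any_cons, ih] <;> simp [Bool.or_assoc]

-- the dict lookup, compared against one fixed theme, is membership in that theme's keyword list
lemma kwmap1 (kw : String) : (kwThemeMap.get? kw == some "Screenshot Restrictions")
    = (["screenshot", "gallery", "photo", "image", "capture", "snap", "picture", "save", "evidence"] : List String).contains kw := by
  by_cases h : kw ∈ (["screenshot", "gallery", "photo", "image", "capture", "snap", "picture", "save", "evidence"] : List String)
  · have h2 := h
    simp only [List.mem_cons, List.not_mem_nil, or_false] at h2
    rcases h2 with rfl|rfl|rfl|rfl|rfl|rfl|rfl|rfl|rfl <;> decide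
  · have hne : kwThemeMap.get? kw ≠ some "Screenshot Restrictions" := by
      intro hg
      have hm := PySem.Dict.mem_items_of_get?_eq_some (d := kwThemeMap) hg
      simp only [kwThemeMap, List.mem_cons, Prod.mk.injEq, List.not_mem_nil, or_false] at hm
      simp at hm
      simp at h
      tauto
    simp [List.contains_eq_mem, h]
    exact hne

lemma kwmap2 (kw : String) : (kwThemeMap.get? kw == some "App Stability")
    = (["crash", "bug", "unreliable", "fail", "freeze", "error", "slow", "lag", "down"] : List String).contains kw := by
  by_cases h : kw ∈ (["crash", "bug", "unreliable", "fail", "freeze", "error", "slow", "lag", "down"] : List String)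
  · have h2 := h
    simp only [List.mem_cons, List.not_mem_nil, or_false] at h2
    rcases h2 with rfl|rfl|rfl|rfl|rfl|rfl|rfl|rfl|rfl <;> decide
  · have hne : kwThemeMap.get? kw ≠ some "App Stability" := by
      intro hg
      have hm := PySem.Dict.mem_items_of_get?_eq_some (d := kwThemeMap) hg
      simp only [kwThemeMap, List.mem_cons, Prod.mk.injEq, List.not_mem_nil, or_false] at hm
      simp at hm
      simp at h
      tauto
    simp [List.contains_eq_mem, h]
    exact hne

lemma kwmap3 (kw : String) : (kwThemeMap.get? kw == some "Security Features")
    = (["security", "developer", "option", "lock", "verify", "password", "auth", "access", "protect"] : List String).contains kw := by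
  by_cases h : kw ∈ (["security", "developer", "option", "lock", "verify", "password", "auth", "access", "protect"] : List String)
  · have h2 := h
    simp only [List.mem_cons, List.not_mem_nil, or_false] at h2
    rcases h2 with rfl|rfl|rfl|rfl|rfl|rfl|rfl|rfl|rfl <;> decide
  · have hne : kwThemeMap.get? kw ≠ some "Security Features" := by
      intro hg
      have hm := PySem.Dict.mem_items_of_get?_eq_some (d := kwThemeMap) hg
      simp only [kwThemeMap, List.mem_cons, Prod.mk.injEq, List.not_mem_nil, or_false] at hm
      simp at hm
      simp at h
      tauto
    simp [List.contains_eq_mem, h]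
    exact hne

lemma kwmap4 (kw : String) : (kwThemeMap.get? kw == some "Transaction Issues")
    = (["transaction", "payment", "transfer", "delay", "debit", "withdraw", "deposit", "issue", "fund"] : List String).contains kw := by
  by_cases h : kw ∈ (["transaction", "payment", "transfer", "delay", "debit", "withdraw", "deposit", "issue", "fund"] : List String)
  · have h2 := h
    simp only [List.mem_cons, List.not_mem_nil, or_false] at h2
    rcases h2 with rfl|rfl|rfl|rfl|rfl|rfl|rfl|rfl|rfl <;> decide
  · have hne : kwThemeMap.get? kw ≠ some "Transaction Issues" := by
      intro hg
      have hm := PySem.Dict.mem_items_of_get?_eq_some (d := kwThemeMap) hg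
      simp only [kwThemeMap, List.mem_cons, Prod.mk.injEq, List.not_mem_nil, or_false] at hm
      simp at hm
      simp at h
      tauto
    simp [List.contains_eq_mem, h]
    exact hne

lemma pos_contains (kw : String) : positiveKws.contains kw
    = (["good", "great", "nice", "easy", "convenient"] : List String).contains kw := rfl

lemma alt_eq_main (keywords : List String) (bank : String) :
    assign_themes keywords bank = assign_themes_alt keywords bank := by
  unfold assign_themes assign_themes_alt themeOrder
  simp only [List.filter_cons, List.filter_nil]
  rw [fold_snd, fold_fst, fold_fst, fold_fst, fold_fst]
  simp only [funext kwmap1, funext kwmap2, funext kwmap3, funext kwmap4, funext pos_contains]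
  simp only [show (PySem.Set.empty : PySem.Set String).contains = fun _ => false from rfl,
    Bool.false_or]
  cases h1 : keywords.any (fun kw => (["screenshot", "gallery", "photo", "image", "capture", "snap", "picture", "save", "evidence"] : List String).contains kw) <;>
  cases h2 : keywords.any (fun kw => (["crash", "bug", "unreliable", "fail", "freeze", "error", "slow", "lag", "down"] : List String).contains kw) <;>
  cases h3 : keywords.any (fun kw => (["security", "developer", "option", "lock", "verify", "password", "auth", "access", "protect"] : List String).contains kw) <;>
  cases h4 : keywords.any (fun kw => (["transaction", "payment", "transfer", "delay", "debit", "withdraw", "deposit", "issue", "fund"] : List String).contains kw) <;>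
  cases h5 : keywords.any (fun kw => (["good", "great", "nice", "easy", "convenient"] : List String).contains kw) <;>
    simp [h1, h2, h3, h4, h5, PySem.List.slice]

-- ===== VERDICT (by name: the statement is the Claim_ definition above) =====
theorem assign_themes_spec : Claim_equal_assign_themes := by
  intro keywords bank _
  unfold Spec_assign_themes
  exact alt_eq_main keywords bank
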